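-- pv_equiv track=rewrite | github.com/salindne/divisorArithmetic | latexTables/latexConverter.py | var
-- ===== SOURCE A (Python) =====
-- PRIME = 'p'
--
-- def var(codeVar):
--     prevDigit = False
--     latex = ''
--     if codeVar.isdigit():
--         return codeVar
--     for char in codeVar:
--         if char == PRIME:
--             prevDigit = False
--             j = len(latex)
--             if 'prime' == latex[j-6:j-1]:
--                 latex = latex[:j-1] + '\\prime' + latex[j-1:]
--             else:
--                 latex = latex + '^{\\prime}'
--         elif char.isalpha():
--             prevDigit = False
--             latex = latex + char
--         elif char.isdigit():
--             if not prevDigit: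
--                 latex = latex + '_{' + char + '}'
--             else:
--                 latex = latex.rstrip('}') + char + '}'
--             prevDigit = True
--     return latex
-- ===== SOURCE B (Python) =====
-- from itertools import groupby
--
-- PRIME = 'p'
--
-- def _cat(c):
--     if c == PRIME:
--         return 'P'
--     if c.isalpha():
--         return 'A'
--     if c.isdigit():
--         return 'D'
--     return None
--
-- def var(codeVar):
--     if codeVar.isdigit():
--         return codeVar
--     classifiable = [c for c in codeVar if _cat(c) is not None]
--     pieces = []
--     for key, grp in groupby(classifiable, key=_cat):
--         run = ''.join(grp)
--         if key == 'P':
--             pieces.append('^{' + '\\prime' * len(run) + '}')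
--         elif key == 'D':
--             pieces.append('_{' + run + '}')
--         else:
--             pieces.append(run)
--     return ''.join(pieces)
-- ===== Notes on version B (the rewrite author's own statement) =====
-- stated objective: simpler
-- what changed: A builds the LaTeX string by in-place surgery per character (slicing out the tail to test for a previous '\prime', insert-before-brace, rstrip of the closing brace); B classifies characters, drops unclassifiable ones, groups the rest into maximal same-category runs with itertools.groupby and emits one piece per run.
import Mathlib
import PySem

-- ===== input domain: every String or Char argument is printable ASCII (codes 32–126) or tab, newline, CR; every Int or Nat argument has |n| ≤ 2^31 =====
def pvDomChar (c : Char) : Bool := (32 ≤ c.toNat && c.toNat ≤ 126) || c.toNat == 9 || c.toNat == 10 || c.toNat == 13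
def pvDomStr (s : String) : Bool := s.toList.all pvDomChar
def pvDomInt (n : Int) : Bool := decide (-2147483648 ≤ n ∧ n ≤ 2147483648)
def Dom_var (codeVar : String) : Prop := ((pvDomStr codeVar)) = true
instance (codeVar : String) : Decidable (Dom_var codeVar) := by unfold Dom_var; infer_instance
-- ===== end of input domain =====

-- B replaces A's character-by-character string surgery (slice test for a previous
-- '\prime', rstrip of the closing brace) by classify-filter-group: one output piece
-- per maximal run of same-category characters; objective: simpler.

-- ===== PORT A =====
-- A's loop body: state (prevDigit, latex); slices ported with PySem.List.slice,
-- rstrip('}') hand-ported as dropping trailing '}' characters (exact).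
def varStep (st : Bool × List Char) (ch : Char) : Bool × List Char :=
  if ch == 'p' then
    let latex := st.2
    let j : Int := latex.length
    (false,
      if ['p','r','i','m','e'] = PySem.List.slice latex (some (j-6)) (some (j-1)) then
        PySem.List.slice latex none (some (j-1)) ++ ['\\','p','r','i','m','e'] ++
          PySem.List.slice latex (some (j-1)) none
      else latex ++ ['^','{','\\','p','r','i','m','e','}'])
  else if PySem.Chars.isalpha ch then (false, st.2 ++ [ch])
  else if PySem.Chars.isdigit ch then
    (true,
      if !st.1 then st.2 ++ ['_','{',ch,'}']
      else ((st.2.reverse.dropWhile (fun c => c == '}')).reverse) ++ [ch, '}'])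
  else st

def var (codeVar : String) : String :=
  if PySem.Str.strIsdigit codeVar then codeVar
  else String.ofList (codeVar.toList.foldl varStep (false, [])).2

-- ===== PORT B =====
inductive PvCat : Type
  | P | A | D
deriving DecidableEq, Repr

-- Source B's _cat: 'p' → prime, alphabetic → alpha, digit → digit, else unclassified
def pvCat (c : Char) : Option PvCat :=
  if c == 'p' then some PvCat.P
  else if PySem.Chars.isalpha c then some PvCat.A
  else if PySem.Chars.isdigit c then some PvCat.D
  else none

-- the key of a run (category of its characters)
def pvGCat (g : List Char) : Option PvCat := g.head?.bind pvCat

-- the piece Source B appends per run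
def pvPiece (g : List Char) : List Char :=
  match pvGCat g with
  | some PvCat.P => ['^','{'] ++ (List.replicate g.length ['\\','p','r','i','m','e']).flatten ++ ['}']
  | some PvCat.D => ['_','{'] ++ g ++ ['}']
  | _ => g

-- itertools.groupby: maximal runs of equal key, hand-ported
def pvRuns (cs : List Char) : List (List Char) :=
  match cs with
  | [] => []
  | c :: rest =>
      (c :: rest.takeWhile (fun x => pvCat x == pvCat c)) ::
        pvRuns (rest.dropWhile (fun x => pvCat x == pvCat c))
termination_by cs.length
decreasing_by
  simp only [List.length_cons]
  exact Nat.lt_succ_of_le (List.length_dropWhile_le _ _)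

def var_alt (codeVar : String) : String :=
  if PySem.Str.strIsdigit codeVar then codeVar
  else String.ofList ((pvRuns (codeVar.toList.filter (fun c => (pvCat c).isSome))).map pvPiece).flatten

-- ===== PRECONDITION & SPEC =====
def Spec_var (codeVar : String) (out : String) : Prop := out = var_alt codeVar
instance (codeVar : String) (out : String) : Decidable (Spec_var codeVar out) := by unfold Spec_var; infer_instance

-- ===== CLAIM (what is proved, stated in full; the proofs are below) =====
def Claim_equal_var : Prop := ∀ (codeVar : String), Dom_var codeVar → Spec_var codeVar (var codeVar)

-- ===== LEMMAS AND PROOFS =====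

-- group lists kept newest-group-first; pvRender is the latex built so far
def pvRender (rgs : List (List Char)) : List Char := ((rgs.reverse).map pvPiece).flatten

def pvLastCat (rgs : List (List Char)) : Option PvCat :=
  match rgs with
  | [] => none
  | g :: _ => pvGCat g

def pvPrevD (rgs : List (List Char)) : Bool := pvLastCat rgs == some PvCat.D

def pvPush (rgs : List (List Char)) (c : Char) : List (List Char) :=
  match rgs with
  | [] => [[c]]
  | g :: t => if pvGCat g = pvCat c then (g ++ [c]) :: t else [c] :: g :: t

def pvGood (rgs : List (List Char)) : Prop :=
  (∀ g ∈ rgs, g ≠ [] ∧ (pvGCat g).isSome ∧ ∀ x ∈ g, pvCat x = pvGCat g) ∧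
  rgs.IsChain (fun a b => pvGCat a ≠ pvGCat b)

theorem pvRuns_nil : pvRuns [] = [] := by rw [pvRuns]

theorem pvRuns_cons (c : Char) (rest : List Char) :
    pvRuns (c :: rest) =
      (c :: rest.takeWhile (fun x => pvCat x == pvCat c)) ::
        pvRuns (rest.dropWhile (fun x => pvCat x == pvCat c)) := by
  rw [pvRuns]

theorem pvRender_cons (g : List Char) (t : List (List Char)) :
    pvRender (g :: t) = pvRender t ++ pvPiece g := by
  simp [pvRender]

theorem pvSuffix_eq_of_len {α : Type} {l1 l2 xs : List α}
    (h1 : l1 <:+ xs) (h2 : l2 <:+ xs) (h : l1.length = l2.length) : l1 = l2 := by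
  rw [List.suffix_iff_eq_drop] at h1 h2
  rw [h1, h2, h]

theorem pvSuffix_of_suffix_le {α : Type} {l1 l2 xs : List α}
    (h1 : l1 <:+ xs) (h2 : l2 <:+ xs) (h : l1.length ≤ l2.length) : l1 <:+ l2 := by
  have hl1 := h1.length_le
  have hl2 := h2.length_le
  rw [List.suffix_iff_eq_drop] at h1 h2
  rw [h1, h2]
  have he : xs.length - l1.length = (xs.length - l2.length) + (l2.length - l1.length) := by omega
  rw [he, ← List.drop_drop]
  exact List.drop_suffix _ _

-- character facts
theorem pvCat_P_iff (c : Char) : pvCat c = some PvCat.P ↔ c = 'p' := by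
  unfold pvCat
  split_ifs with h1 h2 h3 <;> simp_all

theorem pvCat_A_facts {c : Char} (h : pvCat c = some PvCat.A) :
    (c == 'p') = false ∧ PySem.Chars.isalpha c = true := by
  unfold pvCat at h
  split_ifs at h with h1 h2 h3 <;> simp_all

theorem pvCat_D_facts {c : Char} (h : pvCat c = some PvCat.D) :
    (c == 'p') = false ∧ PySem.Chars.isalpha c = false ∧ PySem.Chars.isdigit c = true := by
  unfold pvCat at h
  split_ifs at h with h1 h2 h3 <;> simp_all

theorem pvDigit_ne_brace {c : Char} (h : PySem.Chars.isdigit c = true) : (c == '}') = false := by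
  by_contra hb
  simp at hb
  subst hb
  simp [PySem.Chars.isdigit] at h

-- piece unfoldings
theorem pvPiece_P {g : List Char} (h : pvGCat g = some PvCat.P) :
    pvPiece g = ['^','{'] ++ (List.replicate g.length ['\\','p','r','i','m','e']).flatten ++ ['}'] := by
  simp [pvPiece, h]

theorem pvPiece_A {g : List Char} (h : pvGCat g = some PvCat.A) :
    pvPiece g = g := by
  simp [pvPiece, h]

theorem pvPiece_D {g : List Char} (h : pvGCat g = some PvCat.D) :
    pvPiece g = ['_','{'] ++ g ++ ['}'] := by
  simp [pvPiece, h]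

theorem pvPiece_ends_brace {g : List Char} (h : pvGCat g = some PvCat.P ∨ pvGCat g = some PvCat.D) :
    ∃ X, pvPiece g = X ++ ['}'] := by
  rcases h with h | h
  · exact ⟨_, pvPiece_P h⟩
  · refine ⟨['_','{'] ++ g, ?_⟩
    rw [pvPiece_D h]

-- the slice test in A is exactly: latex ends with "prime" followed by one character
theorem pvWindow (l : List Char) :
    (['p','r','i','m','e'] = PySem.List.slice l (some ((l.length : Int) - 6)) (some ((l.length : Int) - 1)))
    ↔ ∃ c, ['p','r','i','m','e',c] <:+ l := by
  by_cases h6 : 6 ≤ l.length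
  · obtain ⟨m, hm⟩ : ∃ m, l.length = m + 6 := ⟨l.length - 6, by omega⟩
    have e1 : (l.length : Int) - 6 = ((m : Nat) : Int) := by rw [hm]; push_cast; ring
    have e2 : (l.length : Int) - 1 = (((m + 5 : Nat)) : Int) := by rw [hm]; push_cast; ring
    rw [e1, e2, PySem.List.slice_natCast]
    have h5 : m + 5 - m = 5 := by omega
    rw [h5]
    have hw : (l.drop m).length = 6 := by simp [hm]
    constructor
    · intro hp
      have hone : ((l.drop m).drop 5).length = 1 := by rw [List.length_drop, hw]
      obtain ⟨c, hc⟩ := List.length_eq_one_iff.mp hone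
      refine ⟨c, ?_⟩
      have hsplit : l.drop m = (l.drop m).take 5 ++ (l.drop m).drop 5 := by
        rw [List.take_append_drop]
      have : ['p','r','i','m','e',c] = l.drop m := by
        rw [hsplit, ← hp, hc]; rfl
      rw [this]
      exact List.drop_suffix _ _
    · rintro ⟨c, hc⟩
      have hlen : (['p','r','i','m','e',c] : List Char).length = 6 := by simp
      have := List.suffix_iff_eq_drop.mp hc
      rw [hlen, hm] at this
      have h66 : m + 6 - 6 = m := by omega
      rw [h66] at this
      rw [← this]
      rfl
  · constructor
    · intro hp
      have hlen5 := congrArg List.length hp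
      rw [PySem.List.length_slice] at hlen5
      simp only [PySem.List.clampIdx] at hlen5
      split_ifs at hlen5 <;> simp at hlen5 <;> omega
    · rintro ⟨c, hc⟩
      have := hc.length_le
      simp at this
      omega

theorem pvGood_push {rgs : List (List Char)} {c : Char}
    (hg : pvGood rgs) (hc : (pvCat c).isSome) : pvGood (pvPush rgs c) := by
  obtain ⟨hhom, hchain⟩ := hg
  cases rgs with
  | nil =>
      refine ⟨?_, ?_⟩
      · intro g hgm
        simp [pvPush] at hgm
        subst hgm
        exact ⟨by simp, by simpa [pvGCat] using hc, by intro x hx; simp at hx; subst hx; simp [pvGCat]⟩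
      · simp [pvPush]
  | cons g t =>
      obtain ⟨hgne, hgsome, hgall⟩ := hhom g (by simp)
      by_cases hcc : pvGCat g = pvCat c
      · have hpush : pvPush (g :: t) c = (g ++ [c]) :: t := by simp [pvPush, hcc]
        rw [hpush]
        have hgc : pvGCat (g ++ [c]) = pvGCat g := by
          cases g with
          | nil => exact absurd rfl hgne
          | cons a g' => simp [pvGCat]
        refine ⟨?_, ?_⟩
        · intro g' hg'
          rcases List.mem_cons.mp hg' with h | h
          · subst h
            refine ⟨by simp, by rw [hgc]; exact hgsome, ?_⟩
            intro x hx
            rcases List.mem_append.mp hx with h | h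
            · rw [hgc]; exact hgall x h
            · simp at h; subst h; rw [hgc, hcc]
          · exact hhom g' (by simp [h])
        · rw [List.isChain_cons] at hchain ⊢
          refine ⟨?_, hchain.2⟩
          intro y hy
          rw [hgc]
          exact hchain.1 y hy
      · have hpush : pvPush (g :: t) c = [c] :: g :: t := by simp [pvPush, hcc]
        rw [hpush]
        refine ⟨?_, ?_⟩
        · intro g' hg'
          rcases List.mem_cons.mp hg' with h | h
          · subst h
            exact ⟨by simp, by simpa [pvGCat] using hc, by intro x hx; simp at hx; subst hx; simp [pvGCat]⟩
          · exact hhom g' h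
        · rw [List.isChain_cons]
          refine ⟨?_, hchain⟩
          intro y hy
          simp at hy
          subst hy
          have hcc1 : pvGCat [c] = pvCat c := by simp [pvGCat]
          rw [hcc1]
          exact fun h => hcc h.symm

theorem pvNoPrime {rgs : List (List Char)}
    (hg : pvGood rgs) (hne : pvLastCat rgs ≠ some PvCat.P) :
    ¬ ∃ c, ['p','r','i','m','e',c] <:+ pvRender rgs := by
  rintro ⟨c, hsuf⟩
  obtain ⟨hhom, hchain⟩ := hg
  cases rgs with
  | nil =>
      have := hsuf.length_le
      simp [pvRender] at this
  | cons g t =>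
      obtain ⟨hgne, hgsome, hgall⟩ := hhom g (by simp)
      obtain ⟨k, hk⟩ := Option.isSome_iff_exists.mp hgsome
      cases k with
      | P => exact hne (by simp [pvLastCat, hk])
      | D =>
          -- latex ends with a digit then '}'
          obtain ⟨g', d, hgd⟩ := (List.eq_nil_or_concat g).resolve_left hgne
          have hdd : pvCat d = some PvCat.D := by
            have := hgall d (by rw [hgd]; simp)
            rw [hk] at this; exact this
          have hdig : PySem.Chars.isdigit d = true := (pvCat_D_facts hdd).2.2
          have hrend : pvRender (g :: t) = (pvRender t ++ ['_','{'] ++ g') ++ [d, '}'] := by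
            rw [pvRender_cons, pvPiece_D hk, hgd]
            simp
          have h2 : [d, '}'] <:+ pvRender (g :: t) := by rw [hrend]; exact ⟨_, rfl⟩
          have hec : ['e', c] <:+ (['p','r','i','m','e',c] : List Char) := ⟨['p','r','i','m'], rfl⟩
          have h2' : ['e', c] <:+ pvRender (g :: t) := hec.trans hsuf
          have := pvSuffix_eq_of_len h2' h2 (by simp)
          have hde : d = 'e' := by simp at this; exact this.1.symm
          rw [hde] at hdig
          simp [PySem.Chars.isdigit] at hdig
      | A =>
          have hpg : pvPiece g = g := pvPiece_A hk
          have hrend : pvRender (g :: t) = pvRender t ++ g := by rw [pvRender_cons, hpg]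
          by_cases hlen : 6 ≤ g.length
          · have hgsuf : g <:+ pvRender (g :: t) := by rw [hrend]; exact ⟨_, rfl⟩
            have hin : ['p','r','i','m','e',c] <:+ g :=
              pvSuffix_of_suffix_le hsuf hgsuf (by simpa)
            have hp : 'p' ∈ g := hin.subset (by simp)
            have := hgall 'p' hp
            rw [hk] at this
            have hpp : pvCat 'p' = some PvCat.P := by decide
            rw [hpp] at this
            simp at this
          · cases t with
            | nil =>
                have := hsuf.length_le
                rw [hrend] at this
                simp [pvRender] at this
                omega
            | cons g2 t' =>
                obtain ⟨_, hg2some, _⟩ := hhom g2 (by simp)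
                have hg2ne : pvGCat g2 ≠ pvGCat g := by
                  intro h
                  exact (List.isChain_cons_cons.mp hchain).1 h.symm
                have hg2pd : pvGCat g2 = some PvCat.P ∨ pvGCat g2 = some PvCat.D := by
                  obtain ⟨k2, hk2⟩ := Option.isSome_iff_exists.mp hg2some
                  cases k2 with
                  | P => exact Or.inl hk2
                  | D => exact Or.inr hk2
                  | A => exact absurd (hk2.trans hk.symm) hg2ne
                obtain ⟨X, hX⟩ := pvPiece_ends_brace hg2pd
                have hrend2 : pvRender (g :: g2 :: t') = (pvRender t' ++ X) ++ ('}' :: g) := by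
                  rw [hrend, pvRender_cons, hX]
                  simp
                have hbs : ('}' :: g) <:+ pvRender (g :: g2 :: t') := by rw [hrend2]; exact ⟨_, rfl⟩
                have hss : ('}' :: g) <:+ ['p','r','i','m','e',c] :=
                  pvSuffix_of_suffix_le hbs hsuf (by simp; omega)
                have hd6 := List.suffix_iff_eq_drop.mp hss
                have hlb : 1 ≤ g.length := by
                  cases g with
                  | nil => exact absurd rfl hgne
                  | cons a b => simp
                have hub : g.length ≤ 5 := by
                  have := hss.length_le
                  simp at this
                  omega
                interval_cases hgl : g.length <;> simp [hgl] at hd6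

theorem pvHasPrime {rgs : List (List Char)}
    (hg : pvGood rgs) (he : pvLastCat rgs = some PvCat.P) :
    ∃ c, ['p','r','i','m','e',c] <:+ pvRender rgs := by
  cases rgs with
  | nil => simp [pvLastCat] at he
  | cons g t =>
      have hk : pvGCat g = some PvCat.P := he
      obtain ⟨hgne, _, _⟩ := hg.1 g (by simp)
      obtain ⟨n, hn⟩ : ∃ n, g.length = n + 1 := ⟨g.length - 1, by cases g; exact absurd rfl hgne; simp⟩
      refine ⟨'}', ?_⟩
      rw [pvRender_cons, pvPiece_P hk, hn, List.replicate_succ']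
      refine ⟨pvRender t ++ ['^','{'] ++ (List.replicate n ['\\','p','r','i','m','e']).flatten ++ ['\\'], ?_⟩
      simp

theorem pvGCat_append (g : List Char) (c : Char) (h : g ≠ []) :
    pvGCat (g ++ [c]) = pvGCat g := by
  cases g with
  | nil => exact absurd rfl h
  | cons a g' => simp [pvGCat]

theorem varStep_p (b : Bool) (l : List Char) :
    varStep (b, l) 'p' = (false,
      if ['p','r','i','m','e'] = PySem.List.slice l (some ((l.length : Int) - 6)) (some ((l.length : Int) - 1)) then
        PySem.List.slice l none (some ((l.length : Int) - 1)) ++ ['\\','p','r','i','m','e'] ++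
          PySem.List.slice l (some ((l.length : Int) - 1)) none
      else l ++ ['^','{','\\','p','r','i','m','e','}']) := rfl

theorem varStep_alpha {c : Char} (h1 : (c == 'p') = false) (h2 : PySem.Chars.isalpha c = true)
    (b : Bool) (l : List Char) : varStep (b, l) c = (false, l ++ [c]) := by
  unfold varStep
  rw [h1, h2]
  simp

theorem varStep_digit {c : Char} (h1 : (c == 'p') = false) (h2 : PySem.Chars.isalpha c = false)
    (h3 : PySem.Chars.isdigit c = true) (b : Bool) (l : List Char) :
    varStep (b, l) c = (true,
      if !b then l ++ ['_','{',c,'}']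
      else ((l.reverse.dropWhile (fun x => x == '}')).reverse) ++ [c, '}']) := by
  unfold varStep
  rw [h1, h2, h3]
  simp

theorem pvStep {rgs : List (List Char)} {c : Char}
    (hg : pvGood rgs) (hc : (pvCat c).isSome) :
    varStep (pvPrevD rgs, pvRender rgs) c = (pvPrevD (pvPush rgs c), pvRender (pvPush rgs c)) := by
  obtain ⟨k, hk⟩ := Option.isSome_iff_exists.mp hc
  have hpp : pvCat 'p' = some PvCat.P := by decide
  cases k with
  | P =>
      have hcp : c = 'p' := (pvCat_P_iff c).mp hk
      subst hcp
      rw [varStep_p]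
      by_cases hlast : pvLastCat rgs = some PvCat.P
      · cases rgs with
        | nil => simp [pvLastCat] at hlast
        | cons g t =>
            have hkg : pvGCat g = some PvCat.P := hlast
            obtain ⟨hgne, _, _⟩ := hg.1 g (by simp)
            have hpush : pvPush (g :: t) 'p' = (g ++ ['p']) :: t := by
              simp [pvPush, hkg, hpp]
            have hcond := (pvWindow (pvRender (g :: t))).mpr (pvHasPrime hg hlast)
            rw [if_pos hcond, hpush]
            have hlatex : pvRender (g :: t) =
                (pvRender t ++ ['^','{'] ++ (List.replicate g.length ['\\','p','r','i','m','e']).flatten) ++ ['}'] := by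
              rw [pvRender_cons, pvPiece_P hkg]
              simp
            set B := pvRender t ++ ['^','{'] ++ (List.replicate g.length ['\\','p','r','i','m','e']).flatten with hB
            rw [hlatex]
            have e1 : (((B ++ ['}']).length : Nat) : Int) - 1 = ((B.length : Nat) : Int) := by
              simp
            rw [e1]
            rw [show PySem.List.slice (B ++ ['}']) none (some ((B.length : Nat) : Int)) = B from by
              rw [PySem.List.slice_to_natCast]; exact List.take_left]
            rw [show PySem.List.slice (B ++ ['}']) (some ((B.length : Nat) : Int)) none = ['}'] from by
              rw [PySem.List.slice_from_natCast]; exact List.drop_left]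
            have hgapp : pvGCat (g ++ ['p']) = some PvCat.P := by
              rw [pvGCat_append g 'p' hgne]; exact hkg
            rw [Prod.mk.injEq]
            refine ⟨by simp [pvPrevD, pvLastCat, hgapp], ?_⟩
            rw [pvRender_cons, pvPiece_P hgapp]
            simp only [List.length_append, List.length_cons, List.length_nil,
              List.replicate_succ', List.flatten_append, hB]
            simp
      · have hcond : ¬ (['p','r','i','m','e'] =
            PySem.List.slice (pvRender rgs) (some (((pvRender rgs).length : Int) - 6)) (some (((pvRender rgs).length : Int) - 1))) :=
          fun h => pvNoPrime hg hlast ((pvWindow _).mp h)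
        rw [if_neg hcond]
        cases rgs with
        | nil => exact Prod.ext rfl rfl
        | cons g t =>
            have hne : ¬ pvGCat g = pvCat 'p' := by rw [hpp]; exact fun h => hlast h
            have hpush : pvPush (g :: t) 'p' = ['p'] :: g :: t := by
              simp [pvPush, hne]
            rw [hpush]
            refine Prod.ext rfl ?_
            rw [pvRender_cons (g := ['p'])]
            have : pvPiece ['p'] = ['^','{','\\','p','r','i','m','e','}'] := by decide
            rw [this]
  | A =>
      obtain ⟨hbeq, halpha⟩ := pvCat_A_facts hk
      rw [varStep_alpha hbeq halpha]
      cases rgs with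
      | nil =>
          have hgc : pvGCat [c] = some PvCat.A := by simpa [pvGCat] using hk
          refine Prod.ext (by simp [pvPush, pvPrevD, pvLastCat, hgc]) ?_
          simp [pvPush, pvRender, pvPiece_A hgc]
      | cons g t =>
          by_cases hcc : pvGCat g = pvCat c
          · obtain ⟨hgne, _, _⟩ := hg.1 g (by simp)
            have hpush : pvPush (g :: t) c = (g ++ [c]) :: t := by simp [pvPush, hcc]
            have hgapp : pvGCat (g ++ [c]) = some PvCat.A := by
              rw [pvGCat_append g c hgne, hcc, hk]
            rw [hpush]
            refine Prod.ext (by simp [pvPrevD, pvLastCat, hgapp]) ?_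
            rw [pvRender_cons, pvRender_cons, pvPiece_A hgapp,
              pvPiece_A (by rw [hcc, hk] : pvGCat g = some PvCat.A)]
            simp
          · have hpush : pvPush (g :: t) c = [c] :: g :: t := by simp [pvPush, hcc]
            have hgc : pvGCat [c] = some PvCat.A := by simpa [pvGCat] using hk
            rw [hpush]
            refine Prod.ext (by simp [pvPrevD, pvLastCat, hgc]) ?_
            rw [pvRender_cons (g := [c]), pvPiece_A hgc]
  | D =>
      obtain ⟨hbeq, halpha, hdig⟩ := pvCat_D_facts hk
      rw [varStep_digit hbeq halpha hdig]
      by_cases hlast : pvLastCat rgs = some PvCat.D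
      · cases rgs with
        | nil => simp [pvLastCat] at hlast
        | cons g t =>
            have hkg : pvGCat g = some PvCat.D := hlast
            obtain ⟨hgne, _, hgall⟩ := hg.1 g (by simp)
            have hprev : pvPrevD (g :: t) = true := by simp [pvPrevD, pvLastCat, hkg]
            obtain ⟨g', d, hgd⟩ := (List.eq_nil_or_concat g).resolve_left hgne
            have hdd : pvCat d = some PvCat.D := by
              have := hgall d (by rw [hgd]; simp)
              rw [hkg] at this; exact this
            have hdbr : (d == '}') = false := pvDigit_ne_brace (pvCat_D_facts hdd).2.2
            have hpush : pvPush (g :: t) c = (g ++ [c]) :: t := by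
              simp [pvPush, hkg, hk]
            rw [hpush]
            have hgapp : pvGCat (g ++ [c]) = some PvCat.D := by
              rw [pvGCat_append g c hgne]; exact hkg
            have hlatex : pvRender (g :: t) = (pvRender t ++ ['_','{'] ++ g') ++ [d] ++ ['}'] := by
              rw [pvRender_cons, pvPiece_D hkg, hgd]
              simp
            have hstrip : ((pvRender (g :: t)).reverse.dropWhile (fun x => x == '}')).reverse
                = (pvRender t ++ ['_','{'] ++ g') ++ [d] := by
              rw [hlatex]
              rw [List.reverse_append, List.reverse_append]
              simp only [List.reverse_cons, List.reverse_nil, List.nil_append, List.singleton_append]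
              rw [List.dropWhile_cons_of_pos (by decide), List.dropWhile_cons_of_neg (by simp [hdbr])]
              simp
            refine Prod.ext (by simp [pvPrevD, pvLastCat, hgapp]) ?_
            rw [hprev]
            simp only [Bool.not_true, Bool.false_eq_true, if_false, hstrip]
            rw [pvRender_cons, pvPiece_D hgapp, hgd]
            simp
      · have hprev : pvPrevD rgs = false := by
          simp [pvPrevD]
          exact hlast
        rw [hprev]
        simp only [Bool.not_false, if_true]
        have hgc : pvGCat [c] = some PvCat.D := by simpa [pvGCat] using hk
        cases rgs with
        | nil =>
            refine Prod.ext (by simp [pvPush, pvPrevD, pvLastCat, hgc]) ?_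
            simp [pvPush, pvRender, pvPiece_D hgc]
        | cons g t =>
            have hcc : ¬ pvGCat g = pvCat c := by
              rw [hk]; exact fun h => hlast h
            have hpush : pvPush (g :: t) c = [c] :: g :: t := by simp [pvPush, hcc]
            rw [hpush]
            refine Prod.ext (by simp [pvPrevD, pvLastCat, hgc]) ?_
            rw [pvRender_cons (g := [c]), pvPiece_D hgc]
            simp

theorem pvMain (cs : List Char) :
    ∀ rgs, (∀ c ∈ cs, (pvCat c).isSome) → pvGood rgs →
      cs.foldl varStep (pvPrevD rgs, pvRender rgs) =
        (pvPrevD (cs.foldl pvPush rgs), pvRender (cs.foldl pvPush rgs)) := by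
  induction cs with
  | nil => intro rgs _ _; simp
  | cons c cs ih =>
      intro rgs hall hg
      have hc : (pvCat c).isSome := hall c (by simp)
      simp only [List.foldl_cons, pvStep hg hc]
      exact ih (pvPush rgs c) (fun x hx => hall x (by simp [hx])) (pvGood_push hg hc)

theorem pvSkip (st : Bool × List Char) (c : Char) (h : pvCat c = none) : varStep st c = st := by
  unfold pvCat at h
  unfold varStep
  split_ifs at h ⊢ <;> simp_all

theorem pvFilter (cs : List Char) :
    ∀ st, cs.foldl varStep st = (cs.filter (fun c => (pvCat c).isSome)).foldl varStep st := by
  induction cs with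
  | nil => intro st; rfl
  | cons c cs ih =>
      intro st
      by_cases h : (pvCat c).isSome
      · simp [h, ih]
      · have h0 : pvCat c = none := by
          cases hh : pvCat c <;> simp_all
        simp [h, pvSkip st c h0, ih]

theorem pvRunsFold (cs : List Char) :
    ∀ (c₀ : Char) (g : List Char) (t : List (List Char)),
      (∀ x ∈ g, pvCat x = pvCat c₀) →
      List.foldl pvPush ((c₀ :: g) :: t) cs = (pvRuns (c₀ :: g ++ cs)).reverse ++ t := by
  induction cs with
  | nil =>
      intro c₀ g t hg
      simp only [List.foldl_nil, List.append_nil]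
      rw [pvRuns_cons]
      have ht : g.takeWhile (fun x => pvCat x == pvCat c₀) = g :=
        List.takeWhile_eq_self_iff.mpr (fun x hx => by simp [hg x hx])
      have hd : g.dropWhile (fun x => pvCat x == pvCat c₀) = [] := by
        have := List.takeWhile_append_dropWhile (p := fun x => pvCat x == pvCat c₀) (l := g)
        rw [ht] at this
        simpa using this
      rw [ht, hd, pvRuns_nil]
      simp
  | cons c cs ih =>
      intro c₀ g t hg
      simp only [List.foldl_cons]
      by_cases hcc : pvCat c = pvCat c₀
      · have hpush : pvPush ((c₀ :: g) :: t) c = (c₀ :: (g ++ [c])) :: t := by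
          simp [pvPush, pvGCat, hcc]
        rw [hpush, ih c₀ (g ++ [c]) t ?side]
        case side =>
          intro x hx
          rcases List.mem_append.mp hx with h | h
          · exact hg x h
          · simp at h; subst h; exact hcc
        simp
      · have hcc' : pvCat c₀ ≠ pvCat c := fun h => hcc h.symm
        have hpush : pvPush ((c₀ :: g) :: t) c = [c] :: (c₀ :: g) :: t := by
          simp [pvPush, pvGCat, hcc']
        rw [hpush, ih c [] ((c₀ :: g) :: t) (by simp)]
        have ht : (g ++ c :: cs).takeWhile (fun x => pvCat x == pvCat c₀) = g := by
          rw [List.takeWhile_append]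
          have htg : g.takeWhile (fun x => pvCat x == pvCat c₀) = g :=
            List.takeWhile_eq_self_iff.mpr (fun x hx => by simp [hg x hx])
          rw [htg]
          simp [hcc]
        have hd : (g ++ c :: cs).dropWhile (fun x => pvCat x == pvCat c₀) = c :: cs := by
          have := List.takeWhile_append_dropWhile (p := fun x => pvCat x == pvCat c₀) (l := g ++ c :: cs)
          rw [ht] at this
          exact (List.append_cancel_left this)
        conv_rhs => rw [List.cons_append, pvRuns_cons]
        rw [ht, hd]
        simp

theorem pvExtendRuns (cs : List Char) :
    List.foldl pvPush [] cs = (pvRuns cs).reverse := by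
  cases cs with
  | nil => simp [pvRuns_nil]
  | cons c cs =>
      have h := pvRunsFold cs c [] [] (by simp)
      simpa using h

-- ===== VERDICT (by name: the statement is the Claim_ definition above) =====
theorem var_spec : Claim_equal_var := by
  intro s _
  unfold Spec_var var var_alt
  by_cases hguard : PySem.Chars.strIsdigit s.toList = true
  · simp [hguard]
  · rw [PySem.Str.strIsdigit] at *
    simp only [hguard, if_false, Bool.false_eq_true]
    congr 1
    rw [pvFilter]
    have hall : ∀ c ∈ s.toList.filter (fun c => (pvCat c).isSome), (pvCat c).isSome := by
      intro c hc; exact (List.mem_filter.mp hc).2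
    have hmain := pvMain (s.toList.filter (fun c => (pvCat c).isSome)) [] hall ⟨by simp, by simp⟩
    have h0 : pvPrevD ([] : List (List Char)) = false := rfl
    have h1 : pvRender ([] : List (List Char)) = [] := rfl
    rw [h0, h1] at hmain
    rw [hmain, pvExtendRuns]
    simp [pvRender]
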